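-- pv_equiv track=rewrite | github.com/minseokpark6/Problem_Solving | 프로그래머스/0/120869. 외계어 사전/외계어 사전.py | solution
-- ===== SOURCE A (Python) =====
-- def solution(spell, dic):
--     answer = 2
--     spell_copied = spell.copy()
--
--     for word in dic:
--         spell_copied = spell.copy()
--         for i in word:
--             if i in spell_copied:
--                 word = word.replace(i, '')
--                 spell_copied.remove(i)
--         if len(spell_copied) == 0:
--             answer = 1
--
--     return answer
-- ===== SOURCE B (Python) =====
-- def solution(spell, dic):
--     need = {}
--     for s in spell:
--         need[s] = need.get(s, 0) + 1
--     for word in dic: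
--         have = {}
--         for c in word:
--             have[c] = have.get(c, 0) + 1
--         if all(have.get(s, 0) >= n for s, n in need.items()):
--             return 1
--     return 2
-- ===== Notes on version B (the rewrite author's own statement) =====
-- stated objective: faster
-- what changed: A re-copies spell for every word and, per character of the word, does a membership scan plus list removal on the copy; B builds a frequency table of spell once and compares it against a per-word character frequency table, with no removal loop and early return on the first matching word.
import Mathlib
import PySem

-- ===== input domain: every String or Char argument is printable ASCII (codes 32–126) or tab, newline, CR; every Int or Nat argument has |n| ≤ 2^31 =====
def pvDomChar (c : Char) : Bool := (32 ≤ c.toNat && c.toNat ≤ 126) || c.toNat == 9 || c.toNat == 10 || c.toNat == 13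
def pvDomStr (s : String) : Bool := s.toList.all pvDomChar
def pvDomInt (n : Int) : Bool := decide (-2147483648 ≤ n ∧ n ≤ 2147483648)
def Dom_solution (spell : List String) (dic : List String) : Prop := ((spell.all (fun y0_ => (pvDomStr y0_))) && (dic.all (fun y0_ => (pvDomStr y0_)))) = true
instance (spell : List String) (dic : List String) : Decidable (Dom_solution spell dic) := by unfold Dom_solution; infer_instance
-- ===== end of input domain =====

-- B replaces A's per-word remove-loop over a mutated copy of `spell` with two frequency
-- tables compared once per word (objective: faster; drops the quadratic inner loop).

-- ===== PORT A =====
-- one step of A's inner loop; state = (spell_copied, word); `i in word` iterates the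
-- ORIGINAL word's chars, as Python's `for i in word` keeps the string bound at loop entry.
def aStep (st : List String × String) (i : Char) : List String × String :=
  let iStr := String.ofList [i]
  if iStr ∈ st.1 then
    ((PySem.List.remove? st.1 iStr).getD st.1, PySem.Str.replace st.2 iStr "")
  else st

def solution (spell : List String) (dic : List String) : Int :=
  dic.foldl (fun answer word =>
    let st := word.toList.foldl aStep (spell, word)
    if st.1.length = 0 then 1 else answer) 2

-- ===== PORT B =====
-- `need = {}; for s in spell: need[s] = need.get(s, 0) + 1`
def bNeed (spell : List String) : PySem.Dict String Int :=
  spell.foldl (fun d s => d.insert s (d.getD s 0 + 1)) PySem.Dict.empty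

-- `have = {}; for c in word: have[c] = have.get(c, 0) + 1`
def bHave (word : String) : PySem.Dict String Int :=
  word.toList.foldl
    (fun d c => d.insert (String.ofList [c]) (d.getD (String.ofList [c]) 0 + 1))
    PySem.Dict.empty

-- the `for word in dic` loop with early `return 1`
def solutionAltGo (need : PySem.Dict String Int) : List String → Int
  | [] => 2
  | word :: rest =>
      if need.items.all (fun p => decide (p.2 ≤ (bHave word).getD p.1 0)) then 1
      else solutionAltGo need rest

def solution_alt (spell : List String) (dic : List String) : Int :=
  solutionAltGo (bNeed spell) dic

-- ===== PRECONDITION & SPEC =====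
def Spec_solution (spell : List String) (dic : List String) (out : Int) : Prop := out = solution_alt spell dic
instance (spell : List String) (dic : List String) (out : Int) : Decidable (Spec_solution spell dic out) := by unfold Spec_solution; infer_instance

-- ===== CLAIM (what is proved, stated in full; the proofs are below) =====
def Claim_equal_solution : Prop := ∀ (spell : List String) (dic : List String), Dom_solution spell dic → Spec_solution spell dic (solution spell dic)

-- ===== LEMMAS AND PROOFS =====

-- A's inner fold ignores the rebound word in its first component: it is an erase-fold.
theorem solution_inner_fst (l : List Char) (sc : List String) (w : String) :
    (l.foldl aStep (sc, w)).1
    = l.foldl (fun sc i =>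
        if String.ofList [i] ∈ sc then sc.erase (String.ofList [i]) else sc) sc := by
  induction l generalizing sc w with
  | nil => rfl
  | cons i l ih =>
      simp only [List.foldl_cons, aStep]
      by_cases h : String.ofList [i] ∈ sc
      · rw [if_pos h, if_pos h, PySem.List.remove?_eq_some_erase _ _ h]
        exact ih _ _
      · rw [if_neg h, if_neg h]
        exact ih _ _

-- count of any string in the erase-fold result: truncated subtraction.
theorem erase_fold_count (l : List Char) (sc : List String) (s : String) :
    (l.foldl (fun sc i =>
        if String.ofList [i] ∈ sc then sc.erase (String.ofList [i]) else sc) sc).count s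
    = sc.count s - (l.map (fun i => String.ofList [i])).count s := by
  induction l generalizing sc with
  | nil => simp
  | cons i l ih =>
      simp only [List.foldl_cons, List.map_cons]
      by_cases h : String.ofList [i] ∈ sc
      · rw [if_pos h, ih]
        by_cases hs : s = String.ofList [i]
        · have hpos : 0 < sc.count (String.ofList [i]) := List.count_pos_iff.mpr h
          rw [hs, List.count_erase_self, List.count_cons_self]
          omega
        · have hs' : ¬ String.ofList [i] = s := fun he => hs he.symm
          rw [List.count_erase_of_ne hs]
          simp [hs']
      · rw [if_neg h, ih]
        by_cases hs : s = String.ofList [i]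
        · have h0 : sc.count (String.ofList [i]) = 0 := List.count_eq_zero.mpr h
          rw [hs, List.count_cons_self]
          omega
        · have hs' : ¬ String.ofList [i] = s := fun he => hs he.symm
          simp [hs']

-- emptiness of the erase-fold ↔ word's per-character counts cover spell's counts.
theorem inner_empty_iff (word : String) (sc : List String) :
    ((word.toList.foldl (fun sc i =>
        if String.ofList [i] ∈ sc then sc.erase (String.ofList [i]) else sc) sc) = []
    ↔ ∀ s ∈ sc, sc.count s ≤ (word.toList.map (fun i => String.ofList [i])).count s) := by
  constructor
  · intro h s _
    have hc := erase_fold_count word.toList sc s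
    rw [h] at hc
    simp at hc
    omega
  · intro h
    rw [List.eq_nil_iff_forall_not_mem]
    intro s hs
    have hc : (word.toList.foldl (fun sc i =>
        if String.ofList [i] ∈ sc then sc.erase (String.ofList [i]) else sc) sc).count s ≠ 0 :=
      fun h0 => (List.count_eq_zero.mp h0) hs
    rw [erase_fold_count] at hc
    by_cases hmem : s ∈ sc
    · have := h s hmem; omega
    · exact hc (by simp [List.count_eq_zero.mpr hmem])

-- B's `have` dict is the counter of the word's chars as singleton strings.
theorem bHave_eq_counter (word : String) :
    bHave word = PySem.Dict.counter (word.toList.map (fun c => String.ofList [c])) := by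
  unfold bHave
  rw [← PySem.Dict.foldl_insert_getD_add_one_eq_counter, List.foldl_map]

-- B's per-word test ↔ the count condition.
theorem alt_test_iff (spell : List String) (word : String) :
    (((bNeed spell).items.all (fun p => decide (p.2 ≤ (bHave word).getD p.1 0))) = true
    ↔ ∀ s ∈ spell, spell.count s ≤ (word.toList.map (fun c => String.ofList [c])).count s) := by
  unfold bNeed
  rw [PySem.Dict.foldl_insert_getD_add_one_eq_counter, PySem.Dict.items_counter,
    bHave_eq_counter]
  simp only [List.all_eq_true, List.mem_map, decide_eq_true_eq]
  constructor
  · intro h s hs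
    have := h (s, (spell.count s : Int)) ⟨s, (PySem.Set.mem_ofList _ _).mpr hs, rfl⟩
    simp only [PySem.Dict.getD_counter] at this
    exact_mod_cast this
  · rintro h p ⟨s, hs, rfl⟩
    have hs' : s ∈ spell := (PySem.Set.mem_ofList _ _).mp hs
    simp only [PySem.Dict.getD_counter]
    exact_mod_cast h s hs'

-- the per-word conditions of A and B agree.
theorem cond_iff (spell : List String) (word : String) :
    ((word.toList.foldl aStep (spell, word)).1.length = 0
    ↔ ((bNeed spell).items.all (fun p => decide (p.2 ≤ (bHave word).getD p.1 0))) = true) := by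
  rw [solution_inner_fst, List.length_eq_zero_iff, inner_empty_iff, alt_test_iff]

-- once A's accumulator is 1 it stays 1.
theorem foldl_one (spell : List String) (dic : List String) :
    dic.foldl (fun (answer : Int) word =>
      if (word.toList.foldl aStep (spell, word)).1.length = 0 then 1 else answer) 1 = 1 := by
  induction dic with
  | nil => rfl
  | cons w rest ih => simpa only [List.foldl_cons, ite_self] using ih

theorem solution_eq (spell : List String) (dic : List String) :
    solution spell dic = solution_alt spell dic := by
  unfold solution solution_alt
  induction dic with
  | nil => rfl
  | cons w rest ih =>
      simp only [List.foldl_cons, solutionAltGo]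
      by_cases h : (w.toList.foldl aStep (spell, w)).1.length = 0
      · rw [if_pos h, if_pos ((cond_iff spell w).mp h)]
        exact foldl_one spell rest
      · rw [if_neg h, if_neg (fun hb => h ((cond_iff spell w).mpr hb)), ih]

-- ===== VERDICT (by name: the statement is the Claim_ definition above) =====
theorem solution_spec : Claim_equal_solution := by
  intro spell dic _
  unfold Spec_solution
  exact solution_eq spell dic
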